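-- pv_equiv track=rewrite | github.com/iPoe/conversex-api | app/services/game_service.py | tally_votes
-- ===== SOURCE A (Python) =====
-- from typing import Any, Dict, List, Optional, Tuple
--
-- def tally_votes(votes: List[Dict[str, Any]], rubric: Dict[str, int]) -> Tuple[str, int]:
--     """
--     Count votes and determine winning option.
--     Tie-breaker: choose the option with the highest rubric points.
--
--     Args:
--         votes: list of {"voter_name": str, "option_id": str}
--         rubric: {option_id: points}
--
--     Returns:
--         (winning_option_id, points_earned)
--     """
--     if not votes:
--         return "none", 0
--
--     counts: Dict[str, int] = {}
--     for v in votes: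
--         opt = v["option_id"]
--         counts[opt] = counts.get(opt, 0) + 1
--
--     max_votes = max(counts.values())
--     winners = [opt for opt, count in counts.items() if count == max_votes]
--
--     final_option = winners[0]
--     if len(winners) > 1:
--         # Tie-breaker: highest rubric points
--         final_option = max(winners, key=lambda opt: rubric.get(opt, 0))
--
--     return final_option, rubric.get(final_option, 0)
-- ===== SOURCE B (Python) =====
-- from typing import Any, Dict, List, Tuple
--
-- def tally_votes(votes: List[Dict[str, Any]], rubric: Dict[str, int]) -> Tuple[str, int]:
--     """Single streaming pass: count votes and keep the current leader as we go.
--     The leader's key is (its vote count, its rubric points, -its first-seen position),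
--     updated strictly, so the final leader is the option with the highest count,
--     ties broken by rubric points, then by earliest first vote (= A's insertion order)."""
--     if not votes:
--         return "none", 0
--
--     counts: Dict[str, int] = {}
--     first: Dict[str, int] = {}
--     best = None
--     best_key = None
--     for i, v in enumerate(votes):
--         opt = v["option_id"]
--         if opt not in first:
--             first[opt] = i
--         counts[opt] = counts.get(opt, 0) + 1
--         key = (counts[opt], rubric.get(opt, 0), -first[opt])
--         if best is None or key > best_key:
--             best, best_key = opt, key
--     return best, rubric.get(best, 0)
-- ===== Notes on version B (the rewrite author's own statement) =====
-- stated objective: alternative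
-- what changed: A counts first and then runs a three-stage selection over the finished dict (max of counts, filter winners, conditional rubric tie-break pass); B is a single streaming pass that maintains the current leader online while counting, comparing strict (count, rubric, -first_seen_index) keys, with no selection phase over the counts at all.
import Mathlib
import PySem

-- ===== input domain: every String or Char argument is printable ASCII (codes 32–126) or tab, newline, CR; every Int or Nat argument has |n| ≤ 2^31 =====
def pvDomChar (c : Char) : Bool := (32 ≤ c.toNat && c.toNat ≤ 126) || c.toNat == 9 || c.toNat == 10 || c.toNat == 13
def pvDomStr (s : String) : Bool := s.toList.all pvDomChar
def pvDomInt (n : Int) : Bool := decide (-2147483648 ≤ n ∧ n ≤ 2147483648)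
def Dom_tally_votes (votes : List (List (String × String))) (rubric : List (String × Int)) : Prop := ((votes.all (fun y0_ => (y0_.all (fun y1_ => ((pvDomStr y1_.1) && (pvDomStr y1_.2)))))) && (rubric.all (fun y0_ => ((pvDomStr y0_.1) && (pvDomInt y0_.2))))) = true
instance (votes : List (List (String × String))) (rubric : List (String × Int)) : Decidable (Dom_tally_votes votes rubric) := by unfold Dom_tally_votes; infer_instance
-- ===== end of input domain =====

-- B replaces A's count-then-select (max of counts, filter winners, conditional tie-break pass)
-- by ONE streaming pass that maintains the current leader while counting; same result, alternative structure.

-- ===== PORT A =====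
-- v["option_id"] ; Pre_ guarantees the key is present, the default is never used inside Pre_
def pvOptId (v : List (String × String)) : String :=
  (PySem.Dict.get? (PySem.Dict.mk v) "option_id").getD ""

def tally_votes (votes : List (List (String × String))) (rubric : List (String × Int)) : String × Int :=
  if votes.isEmpty then ("none", 0)
  else
    let rub : PySem.Dict String Int := PySem.Dict.mk rubric
    let counts : PySem.Dict String Int :=
      votes.foldl (fun d v => d.insert (pvOptId v) (d.getD (pvOptId v) 0 + 1)) PySem.Dict.empty
    let maxVotes : Int := (PySem.List.max? counts.values (fun x => x)).getD 0
    let winners : List String := (counts.items.filter (fun p => p.2 == maxVotes)).map (fun p => p.1)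
    let final0 : String := winners.headD ""
    let finalOption : String :=
      if 1 < winners.length then
        (PySem.List.max? winners (fun o => rub.getD o 0)).getD final0
      else final0
    (finalOption, rub.getD finalOption 0)

-- ===== PORT B =====
-- Python tuple comparison 'a < b' on 3-tuples of ints (so 'key > best_key' is pvLt3 best_key key)
def pvLt3 (a b : Int × Int × Int) : Bool :=
  a.1 < b.1 || (a.1 == b.1 && (a.2.1 < b.2.1 || (a.2.1 == b.2.1 && a.2.2 < b.2.2)))

-- one iteration of B's loop: state = (counts, first, best as Option (option, its key))
def pvStep (rub : PySem.Dict String Int)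
    (st : PySem.Dict String Int × PySem.Dict String Int × Option (String × (Int × Int × Int)))
    (iv : Int × List (String × String)) :
    PySem.Dict String Int × PySem.Dict String Int × Option (String × (Int × Int × Int)) :=
  let opt := pvOptId iv.2
  let first' := if st.2.1.contains opt then st.2.1 else st.2.1.insert opt iv.1
  let counts' := st.1.insert opt (st.1.getD opt 0 + 1)
  let key := (counts'.getD opt 0, rub.getD opt 0, -(first'.getD opt 0))
  (counts', first',
    match st.2.2 with
    | none => some (opt, key)
    | some (b, bk) => if pvLt3 bk key then some (opt, key) else some (b, bk))

def tally_votes_alt (votes : List (List (String × String))) (rubric : List (String × Int)) : String × Int :=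
  if votes.isEmpty then ("none", 0)
  else
    let rub : PySem.Dict String Int := PySem.Dict.mk rubric
    let st := (PySem.List.enumerate votes 0).foldl (pvStep rub)
      (PySem.Dict.empty, PySem.Dict.empty, none)
    let best := (st.2.2.getD ("", (0, 0, 0))).1
    (best, rub.getD best 0)

-- ===== PRECONDITION & SPEC =====
-- Pre_ excludes exactly the inputs where some vote dict lacks the key "option_id": Python A raises KeyError there.
def Pre_tally_votes (votes : List (List (String × String))) (rubric : List (String × Int)) : Prop :=
  ∀ v ∈ votes, PySem.Dict.contains (PySem.Dict.mk v) "option_id" = true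
instance (votes : List (List (String × String))) (rubric : List (String × Int)) : Decidable (Pre_tally_votes votes rubric) := by unfold Pre_tally_votes; infer_instance

def pvWitness_tally_votes : (List (List (String × String))) × (List (String × Int)) :=
  ([[("voter_name", "ann"), ("option_id", "a")], [("voter_name", "bob"), ("option_id", "b")]], [("a", 3), ("b", 5)])

def Spec_tally_votes (votes : List (List (String × String))) (rubric : List (String × Int)) (out : String × Int) : Prop := out = tally_votes_alt votes rubric
instance (votes : List (List (String × String))) (rubric : List (String × Int)) (out : String × Int) : Decidable (Spec_tally_votes votes rubric out) := by unfold Spec_tally_votes; infer_instance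

-- ===== CLAIM (what is proved, stated in full; the proofs are below) =====
def Claim_equal_tally_votes : Prop := ∀ (votes : List (List (String × String))) (rubric : List (String × Int)), Dom_tally_votes votes rubric → Pre_tally_votes votes rubric → Spec_tally_votes votes rubric (tally_votes votes rubric)

-- ===== LEMMAS AND PROOFS =====

-- the lexicographic value of a Python 3-tuple of ints
def pvL3 (a : Int × Int × Int) : Int ×ₗ Int ×ₗ Int := toLex (a.1, toLex (a.2.1, a.2.2))

theorem pvLt3_iff (a b : Int × Int × Int) : pvLt3 a b = true ↔ pvL3 a < pvL3 b := by
  obtain ⟨a1, a2, a3⟩ := a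
  obtain ⟨b1, b2, b3⟩ := b
  simp [pvLt3, pvL3, Prod.Lex.toLex_lt_toLex]

-- first-occurrence index of o in xs, as the Int that B's `first` dict stores
def pvFI (xs : List String) (o : String) : Int :=
  (((PySem.List.index? xs o).getD 0 : Nat) : Int)

-- the selection key B offers for option o once all of `pre` is counted
def pvK3 (rub : PySem.Dict String Int) (pre : List String) (o : String) : Int × Int × Int :=
  ((pre.count o : Int), rub.getD o 0, -(pvFI pre o))

-- loop invariant of B's single pass, after the options in `pre` have been processed
def pvInv (rub : PySem.Dict String Int) (pre : List String)
    (st : PySem.Dict String Int × PySem.Dict String Int × Option (String × (Int × Int × Int))) : Prop :=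
  st.1 = PySem.Dict.counter pre ∧
  (∀ o : String, st.2.1.get? o = (PySem.List.index? pre o).map (fun n => (n : Int))) ∧
  (match st.2.2 with
   | none => pre = []
   | some (b, k) => b ∈ pre ∧ k = pvK3 rub pre b ∧
       ∀ o ∈ pre, pvL3 (pvK3 rub pre o) ≤ pvL3 (pvK3 rub pre b))

-- keys of already-seen options other than the new one do not change
theorem pvK3_stable (rub : PySem.Dict String Int) (pre : List String) (o opt : String)
    (ho : o ∈ pre) (hne : o ≠ opt) : pvK3 rub (pre ++ [opt]) o = pvK3 rub pre o := by
  unfold pvK3 pvFI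
  rw [PySem.List.index?_append_of_mem _ ho]
  simp [List.count_append, Ne.symm hne]

-- the new option's key strictly increases when it was already seen
theorem pvK3_incr (rub : PySem.Dict String Int) (pre : List String) (opt : String)
    (ho : opt ∈ pre) : pvL3 (pvK3 rub pre opt) < pvL3 (pvK3 rub (pre ++ [opt]) opt) := by
  unfold pvK3 pvFI pvL3
  rw [PySem.List.index?_append_of_mem _ ho]
  refine Prod.Lex.toLex_lt_toLex.mpr (Or.inl ?_)
  simp [List.count_append]

theorem pvInv_step (rub : PySem.Dict String Int) (pre : List String)
    (st : PySem.Dict String Int × PySem.Dict String Int × Option (String × (Int × Int × Int)))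
    (v : List (String × String)) (h : pvInv rub pre st) :
    pvInv rub (pre ++ [pvOptId v]) (pvStep rub st ((pre.length : Int), v)) := by
  obtain ⟨hc, hf, hb⟩ := h
  set opt := pvOptId v with hopt
  set pre' := pre ++ [opt] with hpre'
  -- counts
  have hcount : st.1.insert opt (st.1.getD opt 0 + 1) = PySem.Dict.counter pre' := by
    rw [hc, ← PySem.Dict.foldl_insert_getD_add_one_eq_counter pre', hpre', List.foldl_append]
    rw [PySem.Dict.foldl_insert_getD_add_one_eq_counter]
    rfl
  -- membership of opt in pre decides the `first` branch
  have hmem_iff : st.2.1.contains opt = true ↔ opt ∈ pre := by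
    rw [PySem.Dict.contains_eq_isSome_get?, hf opt]
    cases hidx : PySem.List.index? pre opt with
    | none => simp [(PySem.List.index?_eq_none_iff pre opt).mp hidx]
    | some i => simp [(PySem.List.index?_isSome_iff pre opt).mp (by rw [hidx]; rfl)]
  -- the updated first dict
  have hfirst : ∀ o : String,
      (if st.2.1.contains opt then st.2.1 else st.2.1.insert opt (pre.length : Int)).get? o
        = (PySem.List.index? pre' o).map (fun n => (n : Int)) := by
    intro o
    by_cases hin : opt ∈ pre
    · rw [if_pos (hmem_iff.mpr hin), hf o]
      by_cases ho : o ∈ pre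
      · rw [hpre', PySem.List.index?_append_of_mem _ ho]
      · have h1 : PySem.List.index? pre o = none := (PySem.List.index?_eq_none_iff pre o).mpr ho
        have h2 : PySem.List.index? pre' o = none := by
          refine (PySem.List.index?_eq_none_iff pre' o).mpr ?_
          intro hmem
          rcases List.mem_append.mp hmem with hm | hm
          · exact ho hm
          · exact ho (by rwa [List.mem_singleton.mp hm])
        rw [h1, h2]
    · rw [if_neg (by simpa [hmem_iff] using hin)]
      by_cases heq : o = opt
      · rw [heq, PySem.Dict.get?_insert_self, hpre',
          PySem.List.index?_append_singleton_self pre opt hin]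
        rfl
      · rw [PySem.Dict.get?_insert_of_ne _ _ heq, hf o]
        by_cases ho : o ∈ pre
        · rw [hpre', PySem.List.index?_append_of_mem _ ho]
        · have h1 : PySem.List.index? pre o = none := (PySem.List.index?_eq_none_iff pre o).mpr ho
          have h2 : PySem.List.index? pre' o = none := by
            refine (PySem.List.index?_eq_none_iff pre' o).mpr ?_
            intro hmem
            rcases List.mem_append.mp hmem with hm | hm
            · exact ho hm
            · exact heq (List.mem_singleton.mp hm)
          rw [h1, h2]
  have hmemopt : opt ∈ pre' := by simp [hpre']
  -- the offered key is exactly pvK3 rub pre' opt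
  have hkey : ((st.1.insert opt (st.1.getD opt 0 + 1)).getD opt 0, rub.getD opt 0,
      -((if st.2.1.contains opt then st.2.1 else st.2.1.insert opt (pre.length : Int)).getD opt 0))
        = pvK3 rub pre' opt := by
    have h1 : (st.1.insert opt (st.1.getD opt 0 + 1)).getD opt 0 = (pre'.count opt : Int) := by
      rw [hcount, PySem.Dict.getD_counter]
    obtain ⟨i, hi⟩ : ∃ i, PySem.List.index? pre' opt = some i := by
      cases hx : PySem.List.index? pre' opt with
      | none => exact absurd ((PySem.List.index?_eq_none_iff pre' opt).mp hx) (by simp [hpre'])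
      | some i => exact ⟨i, rfl⟩
    have h2 : (if st.2.1.contains opt then st.2.1 else st.2.1.insert opt (pre.length : Int)).getD opt 0
        = pvFI pre' opt := by
      rw [PySem.Dict.getD_eq_get?_getD, hfirst opt, hi]
      unfold pvFI
      rw [hi]
      rfl
    rw [h1, h2]
    rfl
  refine ⟨hcount, hfirst, ?_⟩
  -- best: reduce the new best component, then case on the old one
  have hbest' : (pvStep rub st ((pre.length : Int), v)).2.2 = (match st.2.2 with
      | none => some (opt, pvK3 rub pre' opt)
      | some (b, bk) => if pvLt3 bk (pvK3 rub pre' opt) then some (opt, pvK3 rub pre' opt)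
          else some (b, bk)) := by
    show (match st.2.2 with
      | none => some (opt, ((st.1.insert opt (st.1.getD opt 0 + 1)).getD opt 0, rub.getD opt 0,
          -((if st.2.1.contains opt then st.2.1 else st.2.1.insert opt (pre.length : Int)).getD opt 0)))
      | some (b, bk) =>
          if pvLt3 bk ((st.1.insert opt (st.1.getD opt 0 + 1)).getD opt 0, rub.getD opt 0,
            -((if st.2.1.contains opt then st.2.1 else st.2.1.insert opt (pre.length : Int)).getD opt 0))
          then some (opt, ((st.1.insert opt (st.1.getD opt 0 + 1)).getD opt 0, rub.getD opt 0,
            -((if st.2.1.contains opt then st.2.1 else st.2.1.insert opt (pre.length : Int)).getD opt 0)))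
          else some (b, bk)) = _
    rw [hkey]
  show (match (pvStep rub st ((pre.length : Int), v)).2.2 with
    | none => pre' = []
    | some (b, k) => b ∈ pre' ∧ k = pvK3 rub pre' b ∧
        ∀ o ∈ pre', pvL3 (pvK3 rub pre' o) ≤ pvL3 (pvK3 rub pre' b))
  rw [hbest']
  cases hcase : st.2.2 with
  | none =>
      have hpre0 : pre = [] := by rw [hcase] at hb; exact hb
      refine ⟨hmemopt, rfl, ?_⟩
      intro o ho
      have : o = opt := by
        subst hpre0; simpa [hpre'] using ho
      rw [this]
  | some bk =>
      obtain ⟨b, k⟩ := bk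
      rw [hcase] at hb
      obtain ⟨hbmem, hbk, hbound⟩ := hb
      show (match (if pvLt3 k (pvK3 rub pre' opt) then some (opt, pvK3 rub pre' opt)
          else some (b, k) : Option (String × (Int × Int × Int))) with
        | none => pre' = []
        | some (b, k) => b ∈ pre' ∧ k = pvK3 rub pre' b ∧
            ∀ o ∈ pre', pvL3 (pvK3 rub pre' o) ≤ pvL3 (pvK3 rub pre' b))
      by_cases hlt : pvLt3 k (pvK3 rub pre' opt) = true
      · rw [if_pos hlt]
        refine ⟨hmemopt, rfl, ?_⟩
        intro o ho
        rcases List.mem_append.mp ho with hm | hm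
        · by_cases heq : o = opt
          · rw [heq]
          · rw [pvK3_stable rub pre o opt hm heq]
            calc pvL3 (pvK3 rub pre o) ≤ pvL3 (pvK3 rub pre b) := hbound o hm
              _ = pvL3 k := by rw [hbk]
              _ ≤ pvL3 (pvK3 rub pre' opt) := le_of_lt ((pvLt3_iff _ _).mp hlt)
        · rw [List.mem_singleton.mp hm]
      · rw [if_neg hlt]
        have hle : pvL3 (pvK3 rub pre' opt) ≤ pvL3 k :=
          le_of_not_gt (fun hgt => hlt ((pvLt3_iff _ _).mpr hgt))
        have hbne : b ≠ opt := by
          intro heq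
          have hbpre : opt ∈ pre := heq ▸ hbmem
          have h3 : pvL3 (pvK3 rub pre opt) < pvL3 k :=
            lt_of_lt_of_le (pvK3_incr rub pre opt hbpre) hle
          rw [hbk, heq] at h3
          exact absurd h3 (lt_irrefl _)
        refine ⟨List.mem_append_left _ hbmem, ?_, ?_⟩
        · rw [hbk, pvK3_stable rub pre b opt hbmem hbne]
        · intro o ho
          rw [pvK3_stable rub pre b opt hbmem hbne, ← hbk]
          rcases List.mem_append.mp ho with hm | hm
          · by_cases heq : o = opt
            · rw [heq]; exact hle
            · rw [pvK3_stable rub pre o opt hm heq]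
              calc pvL3 (pvK3 rub pre o) ≤ pvL3 (pvK3 rub pre b) := hbound o hm
                _ = pvL3 k := by rw [hbk]
          · rw [List.mem_singleton.mp hm]; exact hle

theorem pvInv_fold (rub : PySem.Dict String Int) :
    ∀ (rest : List (List (String × String))) (pre : List String)
      (st : PySem.Dict String Int × PySem.Dict String Int × Option (String × (Int × Int × Int))),
      pvInv rub pre st →
      pvInv rub (pre ++ rest.map pvOptId)
        ((PySem.List.enumerate rest (pre.length : Int)).foldl (pvStep rub) st) := by
  intro rest
  induction rest with
  | nil => intro pre st h; simpa using h
  | cons v vs ih =>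
      intro pre st h
      rw [PySem.List.enumerate_cons, List.foldl_cons]
      have h1 := pvInv_step rub pre st v h
      have h2 := ih (pre ++ [pvOptId v]) _ h1
      have hlen : ((pre ++ [pvOptId v]).length : Int) = (pre.length : Int) + 1 := by
        simp
      rw [hlen] at h2
      simpa [List.append_assoc] using h2

-- ========== A-side characterisation (count, then select = first lexicographic maximum) ==========

-- Python max(l, key) is the FIRST maximal element: running-fold invariant.
theorem pvMax?_go {α κ : Type} [LinearOrder κ] (key : α → κ) :
    ∀ (l : List α) (a m : α),
      l.foldl (fun acc x => match acc with
        | none => some x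
        | some b => if key b < key x then some x else some b) (some a) = some m →
      (∀ y ∈ l, key y ≤ key m) ∧
        (m = a ∨ ∃ pre suf, l = pre ++ m :: suf ∧ key a < key m ∧ ∀ y ∈ pre, key y < key m) := by
  intro l
  induction l with
  | nil =>
      intro a m h
      simp only [List.foldl_nil, Option.some.injEq] at h
      exact ⟨by simp, Or.inl h.symm⟩
  | cons x t ih =>
      intro a m h
      simp only [List.foldl_cons] at h
      by_cases hax : key a < key x
      · rw [if_pos hax] at h
        obtain ⟨hmax, hcase⟩ := ih x m h
        have hxm : key x ≤ key m := by
          rcases hcase with rfl | ⟨pre, suf, _, hlt, _⟩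
          · exact le_refl _
          · exact le_of_lt hlt
        refine ⟨?_, ?_⟩
        · intro y hy
          rcases List.mem_cons.mp hy with rfl | hy
          · exact hxm
          · exact hmax y hy
        · rcases hcase with rfl | ⟨pre, suf, ht, hlt, hpre⟩
          · exact Or.inr ⟨[], t, rfl, hax, by simp⟩
          · refine Or.inr ⟨x :: pre, suf, by rw [ht]; rfl, lt_trans hax hlt, ?_⟩
            intro y hy
            rcases List.mem_cons.mp hy with rfl | hy
            · exact hlt
            · exact hpre y hy
      · rw [if_neg hax] at h
        obtain ⟨hmax, hcase⟩ := ih a m h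
        have hxa : key x ≤ key a := le_of_not_gt hax
        have ham : key a ≤ key m := by
          rcases hcase with rfl | ⟨pre, suf, _, hlt, _⟩
          · exact le_refl _
          · exact le_of_lt hlt
        refine ⟨?_, ?_⟩
        · intro y hy
          rcases List.mem_cons.mp hy with rfl | hy
          · exact le_trans hxa ham
          · exact hmax y hy
        · rcases hcase with rfl | ⟨pre, suf, ht, hlt, hpre⟩
          · exact Or.inl rfl
          · refine Or.inr ⟨x :: pre, suf, by rw [ht]; rfl, hlt, ?_⟩
            intro y hy
            rcases List.mem_cons.mp hy with rfl | hy
            · exact lt_of_le_of_lt hxa hlt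
            · exact hpre y hy

-- PySem.List.max? returns the first key-maximal element, with a strict bound on its prefix.
theorem pvMax?_firstMax {α κ : Type} [LinearOrder κ] (key : α → κ) (l : List α) (m : α)
    (h : PySem.List.max? l key = some m) :
    (∀ y ∈ l, key y ≤ key m) ∧ ∃ pre suf, l = pre ++ m :: suf ∧ ∀ y ∈ pre, key y < key m := by
  cases l with
  | nil => simp [PySem.List.max?] at h
  | cons x t =>
      have h' : t.foldl (fun acc y => match acc with
          | none => some y
          | some b => if key b < key y then some y else some b) (some x) = some m := by
        simpa [PySem.List.max?] using h
      obtain ⟨hmax, hcase⟩ := pvMax?_go key t x m h'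
      have hxm : key x ≤ key m := by
        rcases hcase with rfl | ⟨pre, suf, _, hlt, _⟩
        · exact le_refl _
        · exact le_of_lt hlt
      refine ⟨?_, ?_⟩
      · intro y hy
        rcases List.mem_cons.mp hy with rfl | hy
        · exact hxm
        · exact hmax y hy
      · rcases hcase with rfl | ⟨pre, suf, ht, hlt, hpre⟩
        · exact ⟨[], t, rfl, by simp⟩
        · refine ⟨x :: pre, suf, by rw [ht]; rfl, ?_⟩
          intro y hy
          rcases List.mem_cons.mp hy with rfl | hy
          · exact hlt
          · exact hpre y hy

-- max? over a mapped list.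
theorem pvMax?_map_go {α β κ : Type} [LT κ] [DecidableLT κ] (f : α → β) (k : β → κ) :
    ∀ (l : List α) (acc : Option α),
      (l.map f).foldl (fun acc x => match acc with
        | none => some x
        | some b => if k b < k x then some x else some b) (acc.map f)
      = Option.map f (l.foldl (fun acc x => match acc with
        | none => some x
        | some b => if k (f b) < k (f x) then some x else some b) acc) := by
  intro l
  induction l with
  | nil => intro acc; simp
  | cons x t ih =>
      intro acc
      simp only [List.map_cons, List.foldl_cons]
      cases acc with
      | none => exact ih (some x)
      | some b =>
          simp only [Option.map_some]
          by_cases hb : k (f b) < k (f x)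
          · rw [if_pos hb, if_pos hb]; exact ih (some x)
          · rw [if_neg hb, if_neg hb]; exact ih (some b)

theorem pvMax?_map {α β κ : Type} [LT κ] [DecidableLT κ] (f : α → β) (k : β → κ) (l : List α) :
    PySem.List.max? (l.map f) k = Option.map f (PySem.List.max? l (fun x => k (f x))) := by
  simpa [PySem.List.max?] using pvMax?_map_go f k l none

-- max2? with Int keys IS max? with the lexicographic key.
theorem pvMax2?_lex {α : Type} (l : List α) (k1 k2 : α → Int) :
    PySem.List.max2? l k1 k2
      = PySem.List.max? l (fun x => (toLex (k1 x, k2 x) : Int ×ₗ Int)) := by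
  unfold PySem.List.max2? PySem.List.max?
  congr 1
  funext acc x
  cases acc with
  | none => rfl
  | some m =>
      have hiff : ((decide (k1 m < k1 x) || !decide (k1 x < k1 m) && decide (k2 m < k2 x)) = true)
          ↔ ((toLex (k1 m, k2 m) : Int ×ₗ Int) < toLex (k1 x, k2 x)) := by
        simp only [Bool.or_eq_true, Bool.and_eq_true, Bool.not_eq_true', decide_eq_true_eq,
          decide_eq_false_iff_not, Prod.Lex.toLex_lt_toLex]
        constructor
        · rintro (h | ⟨h1, h2⟩)
          · exact Or.inl h
          · by_cases hxx : k1 m < k1 x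
            · exact Or.inl hxx
            · exact Or.inr ⟨le_antisymm (not_lt.mp h1) (not_lt.mp hxx), h2⟩
        · rintro (h | ⟨h1, h2⟩)
          · exact Or.inl h
          · exact Or.inr ⟨not_lt.mpr (le_of_eq h1), h2⟩
      show (if (decide (k1 m < k1 x) || !decide (k1 x < k1 m) && decide (k2 m < k2 x)) = true then some x else some m)
          = (if (toLex (k1 m, k2 m) : Int ×ₗ Int) < toLex (k1 x, k2 x) then some x else some m)
      exact if_congr hiff rfl rfl

-- uniqueness of the "first maximal element" specification (used by pvSelect_eq)
theorem pvFirstMax_notlt {α κ : Type} [LinearOrder κ] (key : α → κ) {l : List α} {m₁ m₂ : α}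
    {p₁ s₁ p₂ s₂ : List α}
    (he₁ : l = p₁ ++ m₁ :: s₁) (he₂ : l = p₂ ++ m₂ :: s₂)
    (hmax₁ : ∀ y ∈ l, key y ≤ key m₁)
    (hp₂ : ∀ y ∈ p₂, key y < key m₂)
    (hlt : p₁.length < p₂.length) : False := by
  have hlen : p₁.length < l.length := by
    rw [he₁]; simp
  have hm₁ : l[p₁.length]'hlen = m₁ := by
    subst he₁
    rw [List.getElem_append_right (le_refl _)]
    simp
  have hmem : m₁ ∈ p₂ := by
    have hlen2 : p₁.length < p₂.length := hlt
    have : l[p₁.length]'hlen = p₂[p₁.length]'hlen2 := by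
      subst he₂
      exact List.getElem_append_left hlen2
    rw [hm₁] at this
    rw [this]
    exact List.getElem_mem _
  have h1 : key m₁ < key m₂ := hp₂ _ hmem
  have h2 : key m₂ ≤ key m₁ := hmax₁ m₂ (by rw [he₂]; simp)
  exact absurd h1 (not_lt.mpr h2)

theorem pvFirstMax_unique {α κ : Type} [LinearOrder κ] (key : α → κ) {l : List α} {m₁ m₂ : α}
    {p₁ s₁ p₂ s₂ : List α}
    (he₁ : l = p₁ ++ m₁ :: s₁) (he₂ : l = p₂ ++ m₂ :: s₂)
    (hmax₁ : ∀ y ∈ l, key y ≤ key m₁) (hmax₂ : ∀ y ∈ l, key y ≤ key m₂)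
    (hp₁ : ∀ y ∈ p₁, key y < key m₁) (hp₂ : ∀ y ∈ p₂, key y < key m₂) : m₁ = m₂ := by
  rcases lt_trichotomy p₁.length p₂.length with h | h | h
  · exact absurd (pvFirstMax_notlt key he₁ he₂ hmax₁ hp₂ h) (fun f => f.elim)
  · have heq : p₁ ++ m₁ :: s₁ = p₂ ++ m₂ :: s₂ := by rw [← he₁, he₂]
    obtain ⟨-, htail⟩ := List.append_inj heq h
    exact (List.cons_eq_cons.mp htail).1
  · exact absurd (pvFirstMax_notlt key he₂ he₁ hmax₂ hp₁ h) (fun f => f.elim)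

-- A's three-stage selection equals the single selection by the lexicographic (count, rubric) key.
theorem pvSelect_eq (rub : PySem.Dict String Int) (l : List (String × Int)) (hl : l ≠ []) :
    (if 1 < ((l.filter (fun p => p.2 == (PySem.List.max? (l.map (fun p => p.2)) (fun x => x)).getD 0)).map (fun p => p.1)).length then
      (PySem.List.max? ((l.filter (fun p => p.2 == (PySem.List.max? (l.map (fun p => p.2)) (fun x => x)).getD 0)).map (fun p => p.1)) (fun o => rub.getD o 0)).getD
        (((l.filter (fun p => p.2 == (PySem.List.max? (l.map (fun p => p.2)) (fun x => x)).getD 0)).map (fun p => p.1)).headD "")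
     else ((l.filter (fun p => p.2 == (PySem.List.max? (l.map (fun p => p.2)) (fun x => x)).getD 0)).map (fun p => p.1)).headD "")
    = ((PySem.List.max2? l (fun kv => kv.2) (fun kv => rub.getD kv.1 0)).getD ("", 0)).1 := by
  obtain ⟨v, hv⟩ : ∃ v, PySem.List.max? (l.map (fun p => p.2)) (fun x => x) = some v := by
    cases h : PySem.List.max? (l.map (fun p => p.2)) (fun x => x) with
    | none => exact absurd ((PySem.List.max?_eq_none_iff _ _).mp h) (by simpa using hl)
    | some v => exact ⟨v, rfl⟩
  rw [hv]
  simp only [Option.getD_some]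
  have hub : ∀ y ∈ l, y.2 ≤ v := fun y hy =>
    PySem.List.max?_isMax hv _ (List.mem_map_of_mem hy)
  obtain ⟨p0, hp0l, hp0v⟩ := List.mem_map.mp (PySem.List.max?_mem hv)
  have hWne : l.filter (fun p => p.2 == v) ≠ [] :=
    List.ne_nil_of_mem (List.mem_filter.mpr ⟨hp0l, by simp [hp0v]⟩)
  obtain ⟨mP, hmP⟩ : ∃ m, PySem.List.max? (l.filter (fun p => p.2 == v)) (fun q => rub.getD q.1 0) = some m := by
    cases h : PySem.List.max? (l.filter (fun p => p.2 == v)) (fun q => rub.getD q.1 0) with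
    | none => exact absurd ((PySem.List.max?_eq_none_iff _ _).mp h) hWne
    | some m => exact ⟨m, rfl⟩
  have hmap : PySem.List.max? ((l.filter (fun p => p.2 == v)).map (fun p => p.1)) (fun o => rub.getD o 0) = some mP.1 := by
    rw [pvMax?_map]
    rw [hmP]
    rfl
  -- A's final option is mP.1
  have hA : (if 1 < ((l.filter (fun p => p.2 == v)).map (fun p => p.1)).length then
      (PySem.List.max? ((l.filter (fun p => p.2 == v)).map (fun p => p.1)) (fun o => rub.getD o 0)).getD
        (((l.filter (fun p => p.2 == v)).map (fun p => p.1)).headD "")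
     else ((l.filter (fun p => p.2 == v)).map (fun p => p.1)).headD "") = mP.1 := by
    by_cases hlen : 1 < ((l.filter (fun p => p.2 == v)).map (fun p => p.1)).length
    · rw [if_pos hlen, hmap]
      rfl
    · rw [if_neg hlen]
      have hne : ((l.filter (fun p => p.2 == v)).map (fun p => p.1)) ≠ [] := by
        simpa using hWne
      have h1 : ((l.filter (fun p => p.2 == v)).map (fun p => p.1)).length = 1 := by
        have := List.length_pos_of_ne_nil hne
        omega
      obtain ⟨w, hw⟩ := List.length_eq_one_iff.mp h1
      rw [hw] at hmap ⊢
      have hwm : w = mP.1 := by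
        simpa [PySem.List.max?] using hmap
      simpa using hwm
  rw [hA, pvMax2?_lex]
  obtain ⟨mB, hmB⟩ : ∃ m, PySem.List.max? l (fun x => (toLex (x.2, rub.getD x.1 0) : Int ×ₗ Int)) = some m := by
    cases h : PySem.List.max? l (fun x => (toLex (x.2, rub.getD x.1 0) : Int ×ₗ Int)) with
    | none => exact absurd ((PySem.List.max?_eq_none_iff _ _).mp h) hl
    | some m => exact ⟨m, rfl⟩
  rw [hmB]
  simp only [Option.getD_some]
  -- mP and mB agree: both are the first (count, rubric)-maximal entry of l
  obtain ⟨hPmax, preW, sufW, hWeq, hWpre⟩ := pvMax?_firstMax (fun q : String × Int => rub.getD q.1 0) _ _ hmP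
  obtain ⟨hBmax, preB, sufB, hBeq, hBpre⟩ := pvMax?_firstMax (fun x : String × Int => (toLex (x.2, rub.getD x.1 0) : Int ×ₗ Int)) _ _ hmB
  have hmPW := PySem.List.max?_mem hmP
  have hmPl : mP ∈ l := (List.mem_filter.mp hmPW).1
  have hmPv : mP.2 = v := by
    have := (List.mem_filter.mp hmPW).2
    simpa using this
  have hmaxL : ∀ y ∈ l, (toLex (y.2, rub.getD y.1 0) : Int ×ₗ Int) ≤ toLex (mP.2, rub.getD mP.1 0) := by
    intro y hy
    rcases lt_or_eq_of_le (hub y hy) with hlt | heq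
    · exact le_of_lt (Prod.Lex.toLex_lt_toLex.mpr (Or.inl (by rw [hmPv]; exact hlt)))
    · have hyW : y ∈ l.filter (fun p => p.2 == v) := List.mem_filter.mpr ⟨hy, by simp [heq]⟩
      exact Prod.Lex.toLex_le_toLex.mpr (Or.inr ⟨by rw [heq, hmPv], hPmax y hyW⟩)
  obtain ⟨t₁, t₂, hl12, hf₁, hf₂⟩ := List.filter_eq_append_iff.mp hWeq
  obtain ⟨u, w, ht₂, hu, hpm, hfw⟩ := List.filter_eq_cons_iff.mp hf₂
  have hldecomp : l = (t₁ ++ u) ++ mP :: w := by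
    rw [hl12, ht₂, List.append_assoc]
  have hpreL : ∀ y ∈ t₁ ++ u, (toLex (y.2, rub.getD y.1 0) : Int ×ₗ Int) < toLex (mP.2, rub.getD mP.1 0) := by
    intro y hy
    have hyl : y ∈ l := by
      rw [hldecomp]
      exact List.mem_append_left _ hy
    have hlow : y.2 ≠ v → (toLex (y.2, rub.getD y.1 0) : Int ×ₗ Int) < toLex (mP.2, rub.getD mP.1 0) := by
      intro hne
      exact Prod.Lex.toLex_lt_toLex.mpr (Or.inl (by rw [hmPv]; exact lt_of_le_of_ne (hub y hyl) hne))
    rcases List.mem_append.mp hy with hyt | hyu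
    · by_cases hpy : y.2 = v
      · have hmemW : y ∈ preW := by
          rw [← hf₁]
          exact List.mem_filter.mpr ⟨hyt, by simp [hpy]⟩
        exact Prod.Lex.toLex_lt_toLex.mpr (Or.inr ⟨by rw [hpy, hmPv], hWpre y hmemW⟩)
      · exact hlow hpy
    · have hpy : y.2 ≠ v := by
        have := hu y hyu
        simpa using this
      exact hlow hpy
  have hPB : mP = mB :=
    pvFirstMax_unique (fun x : String × Int => (toLex (x.2, rub.getD x.1 0) : Int ×ₗ Int))
      hldecomp hBeq hmaxL hBmax hpreL hBpre
  rw [hPB]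

-- ========== bridging: B's streaming winner is that same first lexicographic maximum ==========

-- the first-occurrence order of dict.keys: PySem.Set.ofList lists options by strictly increasing first index
theorem pvOfList_pairwise (xs : List String) :
    (PySem.Set.ofList xs : List String).Pairwise (fun a b => pvFI xs a < pvFI xs b) := by
  induction xs using List.reverseRecOn with
  | nil => simp [PySem.Set.ofList, PySem.Set.empty]
  | append_singleton t x ih =>
      rw [PySem.Set.ofList_append_singleton]
      show (PySem.Set.add (PySem.Set.ofList t) x).Pairwise _
      unfold PySem.Set.add
      have hstable : ∀ a ∈ (PySem.Set.ofList t : List String), pvFI (t ++ [x]) a = pvFI t a := by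
        intro a ha
        unfold pvFI
        rw [PySem.List.index?_append_of_mem _ ((PySem.Set.mem_ofList t a).mp ha)]
      by_cases hc : (PySem.Set.ofList t : List String).contains x = true
      · rw [if_pos hc]
        refine ih.imp_of_mem ?_
        intro a b ha hb hab
        rw [hstable a ha, hstable b hb]
        exact hab
      · rw [if_neg hc]
        have hx : x ∉ t := by
          intro hmem
          exact hc (List.contains_iff_mem.mpr ((PySem.Set.mem_ofList t x).mpr hmem))
        refine List.pairwise_append.mpr ⟨?_, List.pairwise_singleton _ _, ?_⟩
        · refine ih.imp_of_mem ?_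
          intro a b ha hb hab
          rw [hstable a ha, hstable b hb]
          exact hab
        · intro a ha b hb
          rw [List.mem_singleton.mp hb, hstable a ha]
          have hat : a ∈ t := (PySem.Set.mem_ofList t a).mp ha
          obtain ⟨i, hi⟩ : ∃ i, PySem.List.index? t a = some i := by
            cases hz : PySem.List.index? t a with
            | none => exact absurd ((PySem.List.index?_eq_none_iff t a).mp hz) (by simp [hat])
            | some i => exact ⟨i, rfl⟩
          obtain ⟨hik, -, -⟩ := PySem.List.getElem_of_index?_eq_some hi
          unfold pvFI
          rw [hi, PySem.List.index?_append_singleton_self t x hx]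
          simpa using hik

-- a ≤ on the full 3-part key gives ≤ on its (count, rubric) part
theorem pvL3_le_pair {a b : Int × Int × Int} (h : pvL3 a ≤ pvL3 b) :
    (toLex (a.1, a.2.1) : Int ×ₗ Int) ≤ toLex (b.1, b.2.1) := by
  unfold pvL3 at h
  rcases Prod.Lex.toLex_le_toLex.mp h with h1 | ⟨h1, h2⟩
  · exact Prod.Lex.toLex_le_toLex.mpr (Or.inl h1)
  · rcases Prod.Lex.toLex_le_toLex.mp h2 with h3 | ⟨h3, -⟩
    · exact Prod.Lex.toLex_le_toLex.mpr (Or.inr ⟨h1, le_of_lt h3⟩)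
    · exact Prod.Lex.toLex_le_toLex.mpr (Or.inr ⟨h1, le_of_eq h3⟩)

-- B's streaming winner is the first (count, rubric)-maximal entry of counts.items
theorem pvArgmax_eq (rub : PySem.Dict String Int) (opts : List String) (b : String)
    (hb : b ∈ opts)
    (hbound : ∀ o ∈ opts, pvL3 (pvK3 rub opts o) ≤ pvL3 (pvK3 rub opts b)) :
    ((PySem.List.max2? (PySem.Dict.counter opts).items (fun kv => kv.2) (fun kv => rub.getD kv.1 0)).getD ("", 0)).1 = b := by
  have hitems : (PySem.Dict.counter opts).items
      = (PySem.Set.ofList opts : List String).map (fun k => (k, (opts.count k : Int))) :=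
    PySem.Dict.items_counter opts
  have hne : (PySem.Dict.counter opts).items ≠ [] := by
    rw [hitems]
    exact List.ne_nil_of_mem (List.mem_map_of_mem ((PySem.Set.mem_ofList opts b).mpr hb))
  rw [pvMax2?_lex]
  obtain ⟨m, hm⟩ : ∃ m, PySem.List.max? (PySem.Dict.counter opts).items
      (fun x => (toLex (x.2, rub.getD x.1 0) : Int ×ₗ Int)) = some m := by
    cases h : PySem.List.max? (PySem.Dict.counter opts).items
        (fun x => (toLex (x.2, rub.getD x.1 0) : Int ×ₗ Int)) with
    | none => exact absurd ((PySem.List.max?_eq_none_iff _ _).mp h) hne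
    | some m => exact ⟨m, rfl⟩
  rw [hm]
  simp only [Option.getD_some]
  obtain ⟨hmax, preL, sufL, hdec, hpre⟩ := pvMax?_firstMax _ _ _ hm
  -- m is an entry (o, count o) of the map
  obtain ⟨mo, hmoS, hmo⟩ := List.mem_map.mp (hitems ▸ PySem.List.max?_mem hm)
  have hm1 : m.1 = mo := by rw [← hmo]
  have hm2 : m.2 = (opts.count mo : Int) := by rw [← hmo]
  have hmopts : m.1 ∈ opts := hm1 ▸ (PySem.Set.mem_ofList opts mo).mp hmoS
  -- b's entry
  have hbS : b ∈ (PySem.Set.ofList opts : List String) := (PySem.Set.mem_ofList opts b).mpr hb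
  have hpb : (b, (opts.count b : Int)) ∈ (PySem.Dict.counter opts).items := by
    rw [hitems]; exact List.mem_map_of_mem hbS
  -- (count, rubric) keys of m and b agree
  have hkey_eq : (toLex (m.2, rub.getD m.1 0) : Int ×ₗ Int)
      = toLex ((opts.count b : Int), rub.getD b 0) := by
    have h1 : (toLex ((opts.count b : Int), rub.getD b 0) : Int ×ₗ Int)
        ≤ toLex (m.2, rub.getD m.1 0) := hmax _ hpb
    have h2 : (toLex (m.2, rub.getD m.1 0) : Int ×ₗ Int)
        ≤ toLex ((opts.count b : Int), rub.getD b 0) := by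
      have := pvL3_le_pair (hbound m.1 hmopts)
      simpa [pvK3, hm2, hm1] using this
    exact le_antisymm h2 h1
  by_cases hbm : m.1 = b
  · exact hbm
  -- otherwise b's entry would sit strictly after m with an equal key but a later first index — impossible
  · exfalso
    have hSpair := pvOfList_pairwise opts
    have hdec' : (PySem.Set.ofList opts : List String).map (fun k => (k, (opts.count k : Int)))
        = preL ++ m :: sufL := by rw [← hitems, hdec]
    obtain ⟨s₁, s₂, hS, hs₁, hs₂⟩ := List.map_eq_append_iff.mp hdec'
    obtain ⟨mo', s₂', hs₂eq, hfmo, hmap₂⟩ := List.map_eq_cons_iff.mp hs₂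
    have hpbne : (b, (opts.count b : Int)) ≠ m := by
      intro h
      exact hbm (by rw [← h])
    have hpbmem : (b, (opts.count b : Int)) ∈ preL ++ m :: sufL := hdec ▸ hpb
    have hpbsuf : (b, (opts.count b : Int)) ∈ sufL := by
      rcases List.mem_append.mp hpbmem with hmem | hmem
      · have hck : (toLex ((opts.count b : Int), rub.getD b 0) : Int ×ₗ Int)
            < toLex (m.2, rub.getD m.1 0) := hpre _ hmem
        exact absurd hkey_eq.le (not_le.mpr hck)
      · rcases List.mem_cons.mp hmem with h | h
        · exact absurd h hpbne
        · exact h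
    obtain ⟨bo, hbo₂, hfbo⟩ := List.mem_map.mp (show (b, (opts.count b : Int)) ∈ s₂'.map
        (fun k => (k, (opts.count k : Int))) by rw [hmap₂]; exact hpbsuf)
    have hbo : bo = b := congrArg Prod.fst hfbo
    have hmo' : mo' = m.1 := congrArg Prod.fst hfmo
    -- first-index order: m.1 was seen strictly before b
    have hfi : pvFI opts m.1 < pvFI opts b := by
      rw [hS, hs₂eq] at hSpair
      have h2 := (List.pairwise_append.mp hSpair).2.1
      have h3 := (List.pairwise_cons.mp h2).1 bo hbo₂
      rwa [hmo', hbo] at h3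
    -- equal (count, rubric) keys but a strictly later first index contradict hbound at m.1
    have hcnt : (opts.count m.1 : Int) = (opts.count b : Int) := by
      have := congrArg (fun x : Int ×ₗ Int => (ofLex x).1) hkey_eq
      simpa [hm2, hm1] using this
    have hrb : rub.getD m.1 0 = rub.getD b 0 := by
      have := congrArg (fun x : Int ×ₗ Int => (ofLex x).2) hkey_eq
      simpa using this
    have hlt : pvL3 (pvK3 rub opts b) < pvL3 (pvK3 rub opts m.1) := by
      unfold pvL3 pvK3
      refine Prod.Lex.toLex_lt_toLex.mpr (Or.inr ⟨hcnt.symm, ?_⟩)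
      exact Prod.Lex.toLex_lt_toLex.mpr (Or.inr ⟨hrb.symm, by dsimp only; omega⟩)
    exact absurd (hbound m.1 hmopts) (not_le.mpr hlt)

-- The ports agree on every input.
theorem pvPorts_eq (votes : List (List (String × String))) (rubric : List (String × Int)) :
    tally_votes votes rubric = tally_votes_alt votes rubric := by
  cases votes with
  | nil => rfl
  | cons v vs =>
    set rub : PySem.Dict String Int := PySem.Dict.mk rubric with hrub
    set opts : List String := (v :: vs).map pvOptId with hopts
    have hopts_ne : opts ≠ [] := by simp [hopts]
    -- A's counts dict is counter opts
    have hcounts : (v :: vs).foldl (fun d u => d.insert (pvOptId u) (d.getD (pvOptId u) 0 + 1)) PySem.Dict.empty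
        = PySem.Dict.counter opts := by
      rw [hopts, ← PySem.Dict.foldl_insert_getD_add_one_eq_counter, List.foldl_map]
    have hitems_ne : (PySem.Dict.counter opts).items ≠ [] := by
      rw [PySem.Dict.items_counter]
      exact List.ne_nil_of_mem (List.mem_map_of_mem
        ((PySem.Set.mem_ofList opts (pvOptId v)).mpr (by simp [hopts])))
    -- B's invariant at the end of the loop
    have hinit : pvInv rub [] ((PySem.Dict.empty, PySem.Dict.empty, none) :
        PySem.Dict String Int × PySem.Dict String Int × Option (String × (Int × Int × Int))) := by
      refine ⟨rfl, ?_, rfl⟩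
      intro o
      simp [PySem.Dict.get?_empty, PySem.List.index?]
    have hfold := pvInv_fold rub (v :: vs) [] _ hinit
    simp only [List.length_nil, Nat.cast_zero, List.nil_append] at hfold
    rw [← hopts] at hfold
    set st := (PySem.List.enumerate (v :: vs) 0).foldl (pvStep rub)
      (PySem.Dict.empty, PySem.Dict.empty, none) with hst
    obtain ⟨-, -, hbest⟩ := hfold
    cases hcase : st.2.2 with
    | none =>
        rw [hcase] at hbest
        exact absurd hbest hopts_ne
    | some bk =>
        obtain ⟨b, k⟩ := bk
        rw [hcase] at hbest
        obtain ⟨hbmem, -, hbound⟩ := hbest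
        -- evaluate both ports
        show (if (v :: vs).isEmpty then (("none", 0) : String × Int) else _)
            = (if (v :: vs).isEmpty then (("none", 0) : String × Int) else _)
        simp only [List.isEmpty_cons, Bool.false_eq_true, if_false]
        rw [hcounts]
        rw [show (PySem.Dict.counter opts).values = (PySem.Dict.counter opts).items.map (fun p => p.2) from rfl]
        rw [pvSelect_eq rub (PySem.Dict.counter opts).items hitems_ne]
        rw [pvArgmax_eq rub opts b hbmem hbound]
        rw [hcase]
        rfl

-- ===== VERDICT (by name: the statement is the Claim_ definition above) =====
theorem tally_votes_spec : Claim_equal_tally_votes := by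
  intro votes rubric _ _
  unfold Spec_tally_votes
  exact pvPorts_eq votes rubric
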